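-- pv_equiv track=rewrite | github.com/Tim3720/Segmenter | measure_callback.py | get_img_dict
-- ===== SOURCE A (Python) =====
-- def get_img_dict(labeled_data):
--     img_dict = {}
--     for row in labeled_data:
--         fn, _, _, _, x_min, y_min, x_max, y_max = row
--         x_min = int(x_min)
--         y_min = int(y_min)
--         x_max = int(x_max)
--         y_max = int(y_max)
--         if not fn in img_dict.keys():
--             img_dict[fn] = []
--         c_x = round((x_min + x_max) / 2)
--         c_y = round((y_min + y_max) / 2)
--         img_dict[fn].append((c_x, c_y))
--     return img_dict
-- ===== SOURCE B (Python) =====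
-- def get_img_dict(labeled_data):
--     centers = [(r[0], (round((int(r[4]) + int(r[6])) / 2),
--                        round((int(r[5]) + int(r[7])) / 2)))
--                for r in labeled_data]
--     return {fn: [c for f, c in centers if f == fn]
--             for fn in dict.fromkeys(f for f, _ in centers)}
-- ===== Notes on version B (the rewrite author's own statement) =====
-- stated objective: alternative
-- what changed: Replaces A's single pass that mutates a dict (insert-empty-then-append per row) with a map to (filename, center) pairs, an ordered dedup of filenames, and a per-filename filter comprehension building each group's list.
import Mathlib
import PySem

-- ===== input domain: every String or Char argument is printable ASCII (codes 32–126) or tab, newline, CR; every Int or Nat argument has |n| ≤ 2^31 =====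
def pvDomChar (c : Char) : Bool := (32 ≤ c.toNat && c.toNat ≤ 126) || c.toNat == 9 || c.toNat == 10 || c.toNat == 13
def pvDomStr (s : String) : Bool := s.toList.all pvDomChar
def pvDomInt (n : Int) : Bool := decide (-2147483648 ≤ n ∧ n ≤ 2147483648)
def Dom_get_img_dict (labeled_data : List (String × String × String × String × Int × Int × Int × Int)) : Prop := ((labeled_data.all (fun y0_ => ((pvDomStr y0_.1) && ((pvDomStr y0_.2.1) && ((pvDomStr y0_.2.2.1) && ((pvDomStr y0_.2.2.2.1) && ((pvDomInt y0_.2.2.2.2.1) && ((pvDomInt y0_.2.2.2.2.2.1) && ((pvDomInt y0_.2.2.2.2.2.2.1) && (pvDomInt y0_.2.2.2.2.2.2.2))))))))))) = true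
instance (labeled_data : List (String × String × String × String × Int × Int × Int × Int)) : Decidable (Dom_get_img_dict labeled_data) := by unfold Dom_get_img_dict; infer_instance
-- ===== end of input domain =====

-- B regroups A's maintain-a-dict single pass as map-centers + ordered-dedup of filenames + per-filename
-- filter comprehensions (objective: alternative decomposition, same results, not claimed faster).
-- round((a + b) / 2) in Python: a + b is exact in a float here (|a|,|b| ≤ 2^31 on Dom, far below 2^53),
-- s / 2 is exact, and round is half-to-even; this helper is that value, exactly, shared by both ports.
def pyRoundHalf (s : Int) : Int :=
  if s % 2 = 0 then s / 2
  else (if PySem.Int.floordiv s 2 % 2 = 0 then PySem.Int.floordiv s 2 else PySem.Int.floordiv s 2 + 1)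

-- the center pair round((x_min+x_max)/2), round((y_min+y_max)/2) of a row (int(...) on an int is the identity)
def pvCenter (r : String × String × String × String × Int × Int × Int × Int) : Int × Int :=
  (pyRoundHalf (r.2.2.2.2.1 + r.2.2.2.2.2.2.1), pyRoundHalf (r.2.2.2.2.2.1 + r.2.2.2.2.2.2.2))

-- ===== PORT A ===== (the dict img_dict is the fold state; `if not fn in img_dict.keys(): img_dict[fn] = []`
-- then `img_dict[fn].append(c)` — the append is Dict.modify with default [])
def get_img_dict (labeled_data : List (String × String × String × String × Int × Int × Int × Int)) : List (String × List (Int × Int)) :=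
  (labeled_data.foldl
    (fun (d : PySem.Dict String (List (Int × Int))) r =>
      let fn := r.1
      let d := if d.contains fn then d else d.insert fn []
      d.modify fn [] (fun v => v ++ [pvCenter r]))
    PySem.Dict.empty).items

-- ===== PORT B ===== (Source B: list of (fn, center) pairs, then a dict comprehension over the
-- first-occurrence-ordered distinct filenames, each value a filter-and-project comprehension)
def get_img_dict_alt (labeled_data : List (String × String × String × String × Int × Int × Int × Int)) : List (String × List (Int × Int)) :=
  let centers := labeled_data.map (fun r => (r.1, pvCenter r))
  (PySem.List.dedup (centers.map (·.1))).map
    (fun fn => (fn, (centers.filter (fun p => p.1 == fn)).map (·.2)))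

-- ===== PRECONDITION & SPEC =====
def Spec_get_img_dict (labeled_data : List (String × String × String × String × Int × Int × Int × Int)) (out : List (String × List (Int × Int))) : Prop := out = get_img_dict_alt labeled_data
instance (labeled_data : List (String × String × String × String × Int × Int × Int × Int)) (out : List (String × List (Int × Int))) : Decidable (Spec_get_img_dict labeled_data out) := by unfold Spec_get_img_dict; infer_instance

-- ===== CLAIM (what is proved, stated in full; the proofs are below) =====
def Claim_equal_get_img_dict : Prop := ∀ (labeled_data : List (String × String × String × String × Int × Int × Int × Int)), Dom_get_img_dict labeled_data → Spec_get_img_dict labeled_data (get_img_dict labeled_data)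

-- ===== LEMMAS AND PROOFS =====

-- A's step (insert-[]-if-absent, then append) is exactly Dict.modify with default []
theorem step_eq_modify (d : PySem.Dict String (List (Int × Int))) (k : String)
    (c : Int × Int) :
    (if d.contains k then d else d.insert k []).modify k [] (fun v => v ++ [c])
      = d.modify k [] (fun v => v ++ [c]) := by
  by_cases h : d.contains k = true
  · simp [h]
  · simp only [Bool.not_eq_true] at h
    simp [h, PySem.Dict.modify, PySem.Dict.getD_insert_self, PySem.Dict.insert_insert_self,
          PySem.Dict.getD_of_not_contains d [] h]

-- A's fold is the modify-append fold over the (filename, center) pair list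
theorem foldA_eq (labeled_data : List (String × String × String × String × Int × Int × Int × Int)) :
    (labeled_data.foldl
      (fun (d : PySem.Dict String (List (Int × Int))) r =>
        let fn := r.1
        let d := if d.contains fn then d else d.insert fn []
        d.modify fn [] (fun v => v ++ [pvCenter r]))
      PySem.Dict.empty)
    = (labeled_data.map (fun r => (r.1, pvCenter r))).foldl
        (fun d p => d.modify p.1 [] (fun v => v ++ [p.2])) PySem.Dict.empty := by
  rw [List.foldl_map]
  congr 1
  funext d r
  exact step_eq_modify d r.1 (pvCenter r)

-- ===== VERDICT (by name: the statement is the Claim_ definition above) =====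

theorem get_img_dict_spec : Claim_equal_get_img_dict := by
  intro ld _
  show get_img_dict ld = get_img_dict_alt ld
  unfold get_img_dict get_img_dict_alt
  rw [foldA_eq]
  set centers := ld.map (fun r => (r.1, pvCenter r)) with hc
  set D := centers.foldl (fun d p => d.modify p.1 [] (fun v => v ++ [p.2])) PySem.Dict.empty with hD
  have hnd : D.keys.Nodup := by
    rw [hD]
    exact PySem.Dict.nodup_keys_foldl_modify_key centers Prod.fst [] (fun _ p v => v ++ [p.2])
      PySem.Dict.empty (by simp)
  have hkeys : D.keys = PySem.List.dedup (centers.map (·.1)) := by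
    rw [hD]
    rw [PySem.Dict.keys_foldl_modify_key]
    simp [PySem.Dict.keys_empty, PySem.Set.update, PySem.Set.ofList_eq_foldl]
  rw [PySem.Dict.items_eq_map_keys D hnd [], hkeys]
  apply List.map_congr_left
  intro k _
  have hg : D.getD k [] = (centers.filter (fun p => p.1 == k)).map (·.2) := by
    rw [hD, PySem.Dict.getD_foldl_modify_append]
    simp [PySem.Dict.getD_empty]
  simp [hg]
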